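-- pv_equiv track=rewrite | github.com/unJASON/crazyflie-lib-python | examples/SwarmRanging/DeadPeriod/PacketAnalysis.py | analysise_ranging_period
-- ===== SOURCE A (Python) =====
-- def analysise_ranging_period(dist,dead_period):
--     dead_period_idx_kv={}
--     distance = dist['distance']
--     check = distance[0]
--     flag = 1
--     for idx, ele in enumerate(distance):
--         if idx == 0:
--             pass
--         else:
--             if ele == check:
--                 flag = flag + 1
--             else:
--                 if flag >= dead_period:
--                     dead_period_idx_kv[idx]=flag
--                 check = ele
--                 flag = 1
--     ranging_period_kv = {}
--     raning_period_list = []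
--     flag_idx = 0
--     for k,v in dead_period_idx_kv.items():
--         raning_period = k-v - flag_idx
--         if raning_period in ranging_period_kv:
--             ranging_period_kv[raning_period] += 1
--         else:
--             ranging_period_kv[raning_period] = 1
--         raning_period_list.append(raning_period)
--         flag_idx = k
--
--     return ranging_period_kv,raning_period_list
-- ===== SOURCE B (Python) =====
-- def analysise_ranging_period(dist, dead_period):
--     distance = dist['distance']
--     # run-length encode distance with an index scan
--     runs = []
--     i = 0
--     n = len(distance)
--     while i < n:
--         j = i + 1
--         while j < n and distance[j] == distance[i]:
--             j += 1
--         runs.append((distance[i], j - i))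
--         i = j
--     # every non-final run of length >= dead_period ends a dead period at its end index
--     dead_kv = {}
--     end = 0
--     for _, L in runs[:-1]:
--         end += L
--         if L >= dead_period:
--             dead_kv[end] = L
--     # ranging periods between consecutive dead periods
--     counts = {}
--     periods = []
--     prev = 0
--     for k, v in dead_kv.items():
--         p = k - v - prev
--         counts[p] = counts.get(p, 0) + 1
--         periods.append(p)
--         prev = k
--     return counts, periods
-- ===== Notes on version B (the rewrite author's own statement) =====
-- stated objective: alternative
-- what changed: B first run-length encodes the distance list, then derives the dead-period dict from each non-final run's length and end index, replacing A's stateful check/flag scan; the second pass folds the branchy dict-count update into a single get-default insert.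
-- crash fix: When dist['distance'] is an empty list A raises IndexError on distance[0]; B returns ({}, []). (A also raises KeyError when the 'distance' key is missing; B does too, so that stays outside Pre_ only.) — e.g. on analysise_ranging_period([("distance", [])], 1): A raises IndexError, B returns ([], [])
import Mathlib
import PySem

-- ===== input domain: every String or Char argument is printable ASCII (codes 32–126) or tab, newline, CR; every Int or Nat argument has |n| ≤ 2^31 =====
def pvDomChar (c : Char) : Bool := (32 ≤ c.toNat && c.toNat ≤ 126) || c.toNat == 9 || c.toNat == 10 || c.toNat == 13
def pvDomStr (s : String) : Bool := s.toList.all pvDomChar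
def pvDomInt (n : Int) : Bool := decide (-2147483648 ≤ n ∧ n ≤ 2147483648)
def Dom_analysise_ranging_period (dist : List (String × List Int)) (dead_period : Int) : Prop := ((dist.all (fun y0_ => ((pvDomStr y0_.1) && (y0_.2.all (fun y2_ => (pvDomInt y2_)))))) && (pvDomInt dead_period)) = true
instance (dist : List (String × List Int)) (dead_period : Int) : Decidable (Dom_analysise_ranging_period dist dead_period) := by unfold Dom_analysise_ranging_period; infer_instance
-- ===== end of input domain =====

-- B replaces A's stateful check/flag scan by a run-length encoding of the distance list followed
-- by a pass over the non-final runs (objective: alternative decomposition, same cost).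

-- ===== PORT A =====
-- first loop of A: for idx, ele in enumerate(distance) with state (check, flag, dead_period_idx_kv)
def apLoop1 (dp : Int) : List Int → Int → Int → Int → PySem.Dict Int Int → PySem.Dict Int Int
  | [], _, _, _, kv => kv
  | e :: es, idx, check, flag, kv =>
    if idx = 0 then apLoop1 dp es (idx + 1) check flag kv
    else if e = check then apLoop1 dp es (idx + 1) check (flag + 1) kv
    else apLoop1 dp es (idx + 1) e 1 (if flag ≥ dp then kv.insert idx flag else kv)

-- second loop of A: for k,v in dead_period_idx_kv.items()
def apLoop2A : List (Int × Int) → PySem.Dict Int Int → List Int → Int → PySem.Dict Int Int × List Int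
  | [], kv2, lst, _ => (kv2, lst)
  | (k, v) :: rest, kv2, lst, flag_idx =>
    let p := k - v - flag_idx
    let kv2' := if kv2.contains p then kv2.insert p (kv2.getD p 0 + 1) else kv2.insert p 1
    apLoop2A rest kv2' (lst ++ [p]) k

def analysise_ranging_period (dist : List (String × List Int)) (dead_period : Int) : (List (Int × Int)) × List Int :=
  let distance := ((PySem.Dict.mk dist).get? "distance").getD []   -- KeyError (none) excluded by Pre_
  match PySem.List.pyGet? distance 0 with
  | none => ([], [])                                               -- IndexError on empty distance: excluded by Pre_
  | some check =>
    let dead := apLoop1 dead_period distance 0 check 1 PySem.Dict.empty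
    let r := apLoop2A dead.items PySem.Dict.empty [] 0
    (r.1.items, r.2)

-- ===== PORT B =====
-- run-length encoding: the inner while-scan of Source B is takeWhile/dropWhile on the tail
def rleB : List Int → List (Int × Int)
  | [] => []
  | x :: t =>
    (x, 1 + ((t.takeWhile (fun y => y = x)).length : Int)) :: rleB (t.dropWhile (fun y => y = x))
  termination_by xs => xs.length
  decreasing_by
    have := List.length_dropWhile_le (fun y => decide (y = x)) t
    simp only [List.length_cons]; omega

-- for _, L in runs[:-1]: end += L; if L >= dead_period: dead_kv[end] = L
def goB (dp : Int) : Int → List (Int × Int) → PySem.Dict Int Int → PySem.Dict Int Int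
  | _, [], kv => kv
  | _, [_], kv => kv
  | e, (_, L) :: g :: gs, kv =>
    let e' := e + L
    goB dp e' (g :: gs) (if L ≥ dp then kv.insert e' L else kv)

-- second loop of Source B: counts[p] = counts.get(p, 0) + 1
def apLoop2B : List (Int × Int) → PySem.Dict Int Int → List Int → Int → PySem.Dict Int Int × List Int
  | [], counts, ps, _ => (counts, ps)
  | (k, v) :: rest, counts, ps, prev =>
    let p := k - v - prev
    apLoop2B rest (counts.insert p (counts.getD p 0 + 1)) (ps ++ [p]) k

def analysise_ranging_period_alt (dist : List (String × List Int)) (dead_period : Int) : (List (Int × Int)) × List Int :=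
  let distance := ((PySem.Dict.mk dist).get? "distance").getD []
  let dead := goB dead_period 0 (rleB distance) PySem.Dict.empty
  let r := apLoop2B dead.items PySem.Dict.empty [] 0
  (r.1.items, r.2)

-- ===== PRECONDITION & SPEC =====
-- Pre_ excludes exactly the inputs where A raises: a missing 'distance' key (KeyError) or an
-- empty distance list (IndexError on distance[0]).
def Pre_analysise_ranging_period (dist : List (String × List Int)) (dead_period : Int) : Prop :=
  ((PySem.Dict.mk dist).get? "distance").getD [] ≠ []
instance (dist : List (String × List Int)) (dead_period : Int) : Decidable (Pre_analysise_ranging_period dist dead_period) := by unfold Pre_analysise_ranging_period; infer_instance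

def pvWitness_analysise_ranging_period : (List (String × List Int)) × Int := ([("distance", [3, 3, 3, 7, 7, 1])], 2)

-- When dist['distance'] is an empty list A raises IndexError on distance[0]; B returns ({}, []).
def Raises_analysise_ranging_period (dist : List (String × List Int)) (dead_period : Int) : Prop :=
  (PySem.Dict.mk dist).get? "distance" = some []
instance (dist : List (String × List Int)) (dead_period : Int) : Decidable (Raises_analysise_ranging_period dist dead_period) := by unfold Raises_analysise_ranging_period; infer_instance
def pvRaiseWitness_analysise_ranging_period : (List (String × List Int)) × Int := ([("distance", [])], 1)
def pvRaiseWitnessOut_analysise_ranging_period : (List (Int × Int)) × List Int := ([], [])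

def Spec_analysise_ranging_period (dist : List (String × List Int)) (dead_period : Int) (out : (List (Int × Int)) × List Int) : Prop := out = analysise_ranging_period_alt dist dead_period
instance (dist : List (String × List Int)) (dead_period : Int) (out : (List (Int × Int)) × List Int) : Decidable (Spec_analysise_ranging_period dist dead_period out) := by unfold Spec_analysise_ranging_period; infer_instance

-- ===== CLAIM (what is proved, stated in full; the proofs are below) =====
def Claim_equal_analysise_ranging_period : Prop := ∀ (dist : List (String × List Int)) (dead_period : Int), Dom_analysise_ranging_period dist dead_period → Pre_analysise_ranging_period dist dead_period → Spec_analysise_ranging_period dist dead_period (analysise_ranging_period dist dead_period)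
def Claim_raises_analysise_ranging_period : Prop := (∀ (dist : List (String × List Int)) (dead_period : Int), Dom_analysise_ranging_period dist dead_period → Raises_analysise_ranging_period dist dead_period → ¬ Pre_analysise_ranging_period dist dead_period) ∧ (Dom_analysise_ranging_period (pvRaiseWitness_analysise_ranging_period.1) (pvRaiseWitness_analysise_ranging_period.2) ∧ Raises_analysise_ranging_period (pvRaiseWitness_analysise_ranging_period.1) (pvRaiseWitness_analysise_ranging_period.2) ∧ analysise_ranging_period_alt (pvRaiseWitness_analysise_ranging_period.1) (pvRaiseWitness_analysise_ranging_period.2) = pvRaiseWitnessOut_analysise_ranging_period)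

-- ===== LEMMAS AND PROOFS =====

-- proof-side run-length encoding, built element-wise from the right
def cons1 (x : Int) : List (Int × Int) → List (Int × Int)
  | [] => [(x, 1)]
  | (y, n) :: gs => if y = x then (y, n + 1) :: gs else (x, 1) :: (y, n) :: gs

def rleC : List Int → List (Int × Int)
  | [] => []
  | x :: xs => cons1 x (rleC xs)

-- merge a pending run (c, f) into the head of a run list
def mh (c f : Int) : List (Int × Int) → List (Int × Int)
  | [] => [(c, f)]
  | (y, n) :: t => if y = c then (c, f + n) :: t else (c, f) :: (y, n) :: t

lemma cons1_eq_rle (x : Int) (t : List Int) :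
    cons1 x (rleC t)
      = (x, 1 + ((t.takeWhile (fun y => y = x)).length : Int)) :: rleC (t.dropWhile (fun y => y = x)) := by
  induction t with
  | nil => simp [rleC, cons1]
  | cons y ys ih =>
    by_cases h : y = x
    · subst h
      have hh : rleC (y :: ys) = cons1 y (rleC ys) := rfl
      rw [hh, ih]
      simp [cons1, List.takeWhile, List.dropWhile]
      ring
    · simp [rleC, List.takeWhile, List.dropWhile, h]
      cases hre : rleC ys with
      | nil => simp [cons1, h]
      | cons g gs =>
        obtain ⟨yv, nv⟩ := g
        by_cases h2 : yv = y <;> simp [cons1, h2, h]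

lemma rleB_eq_rleC (xs : List Int) : rleB xs = rleC xs := by
  induction xs using rleB.induct with
  | case1 => rw [rleB]; rfl
  | case2 x t ih =>
    rw [rleB, ih, rleC, cons1_eq_rle]

lemma cons1_head (x : Int) (l : List (Int × Int)) : ∃ m gs, cons1 x l = (x, m) :: gs := by
  cases l with
  | nil => exact ⟨1, [], rfl⟩
  | cons g gs =>
    obtain ⟨y, n⟩ := g
    by_cases h : y = x
    · subst h; exact ⟨n + 1, gs, by simp [cons1]⟩
    · exact ⟨1, (y, n) :: gs, by simp [cons1, h]⟩

lemma mh_cons1_self (c f : Int) (l : List (Int × Int)) :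
    mh c f (cons1 c l) = mh c (f + 1) l := by
  cases l with
  | nil => simp [cons1, mh]
  | cons g gs =>
    obtain ⟨y, n⟩ := g
    by_cases h : y = c
    · subst h; simp [cons1, mh]; ring
    · simp [cons1, mh, h]

lemma mh_one (e : Int) (l : List (Int × Int)) : mh e 1 l = cons1 e l := by
  cases l with
  | nil => rfl
  | cons g gs =>
    obtain ⟨y, n⟩ := g
    by_cases h : y = e <;> simp [mh, cons1, h]
    omega

lemma mh_cons1_ne (c f e : Int) (l : List (Int × Int)) (h : e ≠ c) :
    mh c f (cons1 e l) = (c, f) :: cons1 e l := by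
  obtain ⟨m, gs, hm⟩ := cons1_head e l
  rw [hm]; simp [mh, h]

lemma loop1_eq_go (dp : Int) (es : List Int) : ∀ (i c f : Int) (kv : PySem.Dict Int Int),
    1 ≤ i → apLoop1 dp es i c f kv = goB dp (i - f) (mh c f (rleC es)) kv := by
  induction es with
  | nil => intro i c f kv _; simp [apLoop1, rleC, mh, goB]
  | cons e es ih =>
    intro i c f kv hi
    rw [apLoop1, if_neg (by omega : ¬ i = 0)]
    by_cases h : e = c
    · subst h
      rw [if_pos rfl, ih _ _ _ _ (by omega)]
      have : i + 1 - (f + 1) = i - f := by ring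
      rw [this, rleC, mh_cons1_self]
    · rw [if_neg h, ih _ _ _ _ (by omega)]
      have h1 : i + 1 - 1 = i := by ring
      rw [h1, mh_one, rleC, mh_cons1_ne _ _ _ _ h]
      obtain ⟨m, gs, hm⟩ := cons1_head e (rleC es)
      rw [hm, goB]
      have h2 : i - f + f = i := by ring
      rw [h2]

lemma loop2_eq (l : List (Int × Int)) : ∀ (kv : PySem.Dict Int Int) (lst : List Int) (fi : Int),
    apLoop2A l kv lst fi = apLoop2B l kv lst fi := by
  induction l with
  | nil => intro kv lst fi; rfl
  | cons p rest ih =>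
    intro kv lst fi
    obtain ⟨k, v⟩ := p
    rw [apLoop2A, apLoop2B]
    by_cases h : kv.contains (k - v - fi)
    · simp only [h, if_true, ih]
    · simp only [h, Bool.false_eq_true, if_false, ih]
      rw [PySem.Dict.getD_of_not_contains kv 0 (by simpa using h)]
      norm_num

-- ===== VERDICT (by name: the statement is the Claim_ definition above) =====
theorem analysise_ranging_period_spec : Claim_equal_analysise_ranging_period := by
  intro dist dead_period _ hpre
  unfold Spec_analysise_ranging_period
  unfold analysise_ranging_period analysise_ranging_period_alt
  unfold Pre_analysise_ranging_period at hpre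
  cases hd : ((PySem.Dict.mk dist).get? "distance").getD [] with
  | nil => exact absurd hd hpre
  | cons d ds =>
    have hget : PySem.List.pyGet? (d :: ds) 0 = some d := by
      simp [PySem.List.pyGet?, PySem.List.pyIdx?]
    have h1 : apLoop1 dead_period (d :: ds) 0 d 1 PySem.Dict.empty
        = goB dead_period 0 (rleB (d :: ds)) PySem.Dict.empty := by
      rw [apLoop1]
      simp only [reduceIte, zero_add]
      rw [loop1_eq_go dead_period ds 1 d 1 PySem.Dict.empty (by omega)]
      have : (1 : Int) - 1 = 0 := by ring
      rw [this, rleB_eq_rleC, rleC, ← mh_one]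
    simp only [hget, h1, loop2_eq]

@[simp] theorem analysise_ranging_period_raises : Claim_raises_analysise_ranging_period := by
  unfold Claim_raises_analysise_ranging_period
  constructor
  · intro dist dead_period _ hr
    unfold Raises_analysise_ranging_period at hr
    unfold Pre_analysise_ranging_period
    rw [hr]
    simp
  · refine ⟨by decide, by decide, ?_⟩
    show analysise_ranging_period_alt [("distance", [])] 1 = ([], [])
    simp only [analysise_ranging_period_alt]
    rw [rleB_eq_rleC]
    decide
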